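-- pv_equiv track=rewrite | github.com/aryansamaria/python_prog | functions/desariumno.py | isdesarium
-- ===== SOURCE A (Python) =====
-- def isdesarium(n):
--     dum=n
--     sum=0
--     l=len(str(n))
--     while dum>0:
--         rem=dum%10
--         sum+=rem**l
--         l-=1
--         dum//=10
--     if sum==n:
--         return True
--     else:
--         return False
-- ===== SOURCE B (Python) =====
-- def isdesarium(n):
--     if n < 0:
--         return False
--     total = 0
--     for i, d in enumerate(str(n)):
--         total += int(d) ** (i + 1)
--     return total == n
-- ===== Notes on version B (the rewrite author's own statement) =====
-- stated objective: idiomatic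
-- what changed: B walks the decimal string left-to-right with enumerate, raising each digit to its 1-based position, instead of peeling digits right-to-left with % and // while counting the exponent down from the digit count; negative n is rejected up front by a guard instead of falling through an empty loop.
import Mathlib
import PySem

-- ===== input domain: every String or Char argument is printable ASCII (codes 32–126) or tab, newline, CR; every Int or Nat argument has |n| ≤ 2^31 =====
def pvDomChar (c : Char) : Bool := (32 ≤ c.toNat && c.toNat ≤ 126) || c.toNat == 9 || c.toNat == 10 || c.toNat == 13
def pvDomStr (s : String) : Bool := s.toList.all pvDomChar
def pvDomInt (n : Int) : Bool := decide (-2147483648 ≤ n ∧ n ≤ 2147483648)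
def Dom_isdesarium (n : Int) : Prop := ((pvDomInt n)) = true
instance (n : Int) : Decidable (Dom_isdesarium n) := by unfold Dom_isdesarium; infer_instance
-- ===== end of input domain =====

-- B checks the Disarium property by walking str(n) left-to-right (digit ^ (position+1)) instead of
-- A's right-to-left %/// digit peel with a countdown exponent; same values, no speed claim.

-- ===== PORT A =====
-- the while loop of A; state (dum, sum, l).  On every reachable state of the loop l ≥ 1
-- (the loop runs exactly len(str(n)) times), so `rem ** l` is ported exactly as `^ l.toNat`.
def isdesariumLoop (dum sum l : Int) : Int :=
  if h : dum > 0 then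
    isdesariumLoop (PySem.Int.floordiv dum 10)
      (sum + (PySem.Int.mod dum 10) ^ l.toNat) (l - 1)
  else sum
termination_by dum.toNat
decreasing_by
  rw [PySem.Int.floordiv_eq_ediv_of_pos (by omega)]
  omega

def isdesarium (n : Int) : Bool :=
  -- l = len(str(n))
  let l : Int := (PySem.Int.toChars n).length
  let s := isdesariumLoop n 0 l
  s == n

-- ===== PORT B =====
def isdesarium_alt (n : Int) : Bool :=
  if n < 0 then false
  else
    -- for i, d in enumerate(str(n)): total += int(d) ** (i + 1)
    -- int(d) on the digit characters of str(n) of a nonnegative int is exactly d.toNat - 48;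
    -- the exponent i+1 is ≥ 1 here, so `** (i+1)` is exactly `^ (i+1).toNat`.
    let total :=
      (PySem.List.enumerate (PySem.Int.toChars n)).foldl
        (fun acc p => acc + ((p.2.toNat : Int) - 48) ^ (p.1 + 1).toNat) 0
    total == n

-- ===== PRECONDITION & SPEC =====
def Spec_isdesarium (n : Int) (out : Bool) : Prop := out = isdesarium_alt n
instance (n : Int) (out : Bool) : Decidable (Spec_isdesarium n out) := by unfold Spec_isdesarium; infer_instance

-- ===== CLAIM (what is proved, stated in full; the proofs are below) =====
def Claim_equal_isdesarium : Prop := ∀ (n : Int), Dom_isdesarium n → Spec_isdesarium n (isdesarium n)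

-- ===== LEMMAS AND PROOFS =====

-- the digit sum both programs compute, over the little-endian digit list, exponent counting down from e
def pvSpecSum : List Nat → Nat → Int
  | [], _ => 0
  | d :: ds, e => (d : Int) ^ e + pvSpecSum ds (e - 1)

-- Nat.toDigits is the big-endian digitChar rendering of Nat.digits (for positive n)
lemma pvToDigitsCore_spec : ∀ (f n : Nat) (acc : List Char), 0 < n → n < f →
    Nat.toDigitsCore 10 f n acc = ((Nat.digits 10 n).map Nat.digitChar).reverse ++ acc := by
  intro f
  induction f with
  | zero => intro n acc _ h; omega
  | succ f ih =>
    intro n acc hn hf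
    rw [Nat.digits_def' (by norm_num : 1 < 10) hn]
    by_cases h10 : n / 10 = 0
    · have : Nat.digits 10 (n / 10) = [] := by rw [h10]; simp
      simp [Nat.toDigitsCore, h10]
    · have hlt : n / 10 < f := lt_of_lt_of_le (Nat.div_lt_self hn (by norm_num)) (by omega)
      have := ih (n / 10) (Nat.digitChar (n % 10) :: acc) (Nat.pos_of_ne_zero h10) hlt
      simp only [Nat.toDigitsCore, h10, if_false, this]
      simp

lemma pvToChars_pos (m : Nat) (hm : 0 < m) :
    PySem.Int.toChars (m : Int) = ((Nat.digits 10 m).map Nat.digitChar).reverse := by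
  have h1 : ¬ ((m : Int) < 0) := by omega
  rw [PySem.Int.toChars, if_neg h1]
  rw [show ((m : Int)).toNat = m from Int.toNat_natCast m]
  rw [Nat.toDigits, pvToDigitsCore_spec (m + 1) m [] hm (by omega)]
  simp

lemma pvLoop_spec : ∀ (m : Nat), 0 < m → ∀ (s : Int) (e : Nat),
    (Nat.digits 10 m).length ≤ e →
    isdesariumLoop (m : Int) s (e : Int) = s + pvSpecSum (Nat.digits 10 m) e := by
  intro m
  induction m using Nat.strong_induction_on with
  | _ m ih =>
    intro hm s e hlen
    have hlen1 : 1 ≤ e := by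
      have : Nat.digits 10 m ≠ [] := Nat.digits_ne_nil_iff_ne_zero.mpr (by omega)
      have := List.length_pos_of_ne_nil this
      omega
    rw [isdesariumLoop, dif_pos (by exact_mod_cast hm)]
    rw [show PySem.Int.mod (m : Int) 10 = ((m % 10 : Nat) : Int) from by
      exact_mod_cast PySem.Int.mod_natCast m 10]
    rw [show PySem.Int.floordiv (m : Int) 10 = ((m / 10 : Nat) : Int) from by
      exact_mod_cast PySem.Int.floordiv_natCast m 10]
    rw [show ((e : Int)).toNat = e from Int.toNat_natCast e]
    rw [show (e : Int) - 1 = ((e - 1 : Nat) : Int) by omega]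
    rw [Nat.digits_def' (by norm_num : 1 < 10) hm]
    by_cases h10 : m / 10 = 0
    · rw [h10]
      rw [isdesariumLoop]
      simp [pvSpecSum]
    · have hrec := ih (m / 10) (Nat.div_lt_self hm (by norm_num)) (Nat.pos_of_ne_zero h10)
        (s + ((m % 10 : Nat) : Int) ^ e) (e - 1)
        (by
          have := hlen
          rw [Nat.digits_def' (by norm_num : 1 < 10) hm] at this
          simp at this
          omega)
      rw [hrec]
      simp [pvSpecSum]
      ring

lemma pvBside (D : List Nat) (hD : ∀ d ∈ D, d < 10) :
    ((PySem.List.enumerate ((D.map Nat.digitChar).reverse)).foldl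
      (fun acc p => acc + ((p.2.toNat : Int) - 48) ^ (p.1 + 1).toNat) 0)
      = pvSpecSum D D.length := by
  induction D with
  | nil => simp [pvSpecSum]
  | cons d ds ih =>
    have hd : d < 10 := hD d (by simp)
    have hds : ∀ x ∈ ds, x < 10 := fun x hx => hD x (by simp [hx])
    have hlen : ((ds.map Nat.digitChar).reverse).length = ds.length := by simp
    have hchar : ((Nat.digitChar d).toNat : Int) - 48 = (d : Int) := by
      interval_cases d <;> decide
    rw [show ((d :: ds).map Nat.digitChar).reverse
          = (ds.map Nat.digitChar).reverse ++ [Nat.digitChar d] by simp]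
    rw [PySem.List.enumerate_append, List.foldl_append, ih hds]
    simp only [hlen, PySem.List.enumerate_cons, PySem.List.enumerate_nil, List.foldl_cons,
      List.foldl_nil]
    rw [hchar]
    rw [show ((0 : Int) + (ds.length : Int) + 1).toNat = ds.length + 1 by omega]
    simp [pvSpecSum]
    ring

-- ===== VERDICT (by name: the statement is the Claim_ definition above) =====
lemma pvLoop_stop (s l : Int) (d : Int) (hd : ¬ d > 0) : isdesariumLoop d s l = s := by
  rw [isdesariumLoop, dif_neg hd]

theorem isdesarium_spec : Claim_equal_isdesarium := by
  intro n _
  simp only [Spec_isdesarium, isdesarium, isdesarium_alt]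
  by_cases hneg : n < 0
  · rw [if_pos hneg, pvLoop_stop _ _ _ (by omega)]
    have h0n : (0 : Int) ≠ n := by omega
    simp [h0n]
  · rw [if_neg hneg]
    by_cases h0 : n = 0
    · subst h0
      rw [pvLoop_stop _ _ _ (by omega)]
      decide
    · have hm : 0 < n.toNat := by omega
      have hn : n = ((n.toNat : Nat) : Int) := by omega
      rw [hn, pvToChars_pos n.toNat hm]
      have hlt : ∀ d ∈ Nat.digits 10 n.toNat, d < 10 := fun d hd =>
        Nat.digits_lt_base (by norm_num) hd
      rw [pvBside (Nat.digits 10 n.toNat) hlt]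
      have hlen : (((Nat.digits 10 n.toNat).map Nat.digitChar).reverse).length
          = (Nat.digits 10 n.toNat).length := by simp
      rw [hlen]
      rw [pvLoop_spec n.toNat hm 0 (Nat.digits 10 n.toNat).length (le_refl _)]
      rw [zero_add]
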